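-- pv_equiv track=rewrite | github.com/danieleschmidt/modelcard-as-code-generator | src/modelcard_generator/research/ai_content_engine.py | _count_technical_words
-- ===== SOURCE A (Python) =====
-- def _count_technical_words(content: str) -> int:
--     """Count technical words in content."""
--     technical_terms = {
--         "algorithm", "model", "training", "validation", "accuracy", "precision", "recall",
--         "optimization", "hyperparameter", "neural", "regression", "classification",
--         "supervised", "unsupervised", "reinforcement", "deep", "machine", "artificial"
--     }
--
--     words = content.lower().split()
--     return sum(1 for word in words if any(term in word for term in technical_terms))
-- ===== SOURCE B (Python) =====
-- def _count_technical_words(content: str) -> int: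
--     """Count technical words in content."""
--     technical_terms = [
--         "algorithm", "model", "training", "validation", "accuracy", "precision", "recall",
--         "optimization", "hyperparameter", "neural", "regression", "classification",
--         "supervised", "unsupervised", "reinforcement", "deep", "machine", "artificial",
--     ]
--     # Index the terms by first letter once, so each position of a word only
--     # checks terms that can possibly start there.
--     by_first = {}
--     for t in technical_terms:
--         by_first.setdefault(t[0], []).append(t)
--
--     count = 0
--     for word in content.lower().split():
--         for i in range(len(word)):
--             if any(word.startswith(t, i) for t in by_first.get(word[i], ())):
--                 count += 1
--                 break
--     return count
-- ===== Notes on version B (the rewrite author's own statement) =====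
-- stated objective: alternative
-- what changed: Replaces the per-word substring scan over all 18 terms by a first-letter index built once: each word is scanned position by position and only terms whose first letter matches the current character are checked with startswith, stopping at the first hit.
import Mathlib
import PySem

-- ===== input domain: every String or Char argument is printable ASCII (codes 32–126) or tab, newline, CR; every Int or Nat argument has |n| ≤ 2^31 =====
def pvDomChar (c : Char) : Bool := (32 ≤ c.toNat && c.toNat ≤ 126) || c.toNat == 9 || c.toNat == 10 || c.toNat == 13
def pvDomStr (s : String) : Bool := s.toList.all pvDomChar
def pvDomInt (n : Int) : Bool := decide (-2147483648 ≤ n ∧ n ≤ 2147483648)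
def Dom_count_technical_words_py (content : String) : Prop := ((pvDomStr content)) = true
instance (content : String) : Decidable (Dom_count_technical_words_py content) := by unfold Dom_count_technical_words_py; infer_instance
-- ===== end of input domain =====

-- B replaces the per-word scan over all 18 terms (substring 'in') by a first-letter index:
-- each word is scanned position by position and only terms starting with the current letter
-- are checked with startswith (objective: alternative; same result).

-- ===== PORT A =====
-- the Python set literal of technical terms
def pvTermsA : PySem.Set String := PySem.Set.ofList
  ["algorithm", "model", "training", "validation", "accuracy", "precision", "recall",
   "optimization", "hyperparameter", "neural", "regression", "classification",
   "supervised", "unsupervised", "reinforcement", "deep", "machine", "artificial"]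

def count_technical_words_py (content : String) : Int :=
  -- words = content.lower().split(); sum(1 for word in words if any(term in word for term in technical_terms))
  (PySem.Str.split₀ (PySem.Str.lower content)).foldl
    (fun acc w => if pvTermsA.any (fun term => PySem.Str.isIn term w) then acc + 1 else acc) 0

-- ===== PORT B =====
def pvTermsB : List String :=
  ["algorithm", "model", "training", "validation", "accuracy", "precision", "recall",
   "optimization", "hyperparameter", "neural", "regression", "classification",
   "supervised", "unsupervised", "reinforcement", "deep", "machine", "artificial"]

-- by_first = {}; for t in terms: by_first.setdefault(t[0], []).append(t)
def pvByFirst : PySem.Dict Char (List String) :=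
  pvTermsB.foldl
    (fun d t => d.insert (t.toList.headD ' ') (d.getD (t.toList.headD ' ') [] ++ [t]))
    PySem.Dict.empty

-- for i in range(len(word)): if any(word.startswith(t, i) for t in by_first.get(word[i], ())): hit; break
-- (the suffix c :: rest is word[i:]; word.startswith(t, i) is exactly 'startswith of the suffix')
def pvScanWord : List Char → Bool
  | [] => false
  | c :: rest =>
      ((pvByFirst.getD c []).any (fun t => PySem.Chars.startswith (c :: rest) t.toList))
        || pvScanWord rest

def count_technical_words_py_alt (content : String) : Int :=
  (PySem.Str.split₀ (PySem.Str.lower content)).foldl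
    (fun acc w => if pvScanWord w.toList then acc + 1 else acc) 0

-- ===== PRECONDITION & SPEC =====
def Spec_count_technical_words_py (content : String) (out : Int) : Prop := out = count_technical_words_py_alt content
instance (content : String) (out : Int) : Decidable (Spec_count_technical_words_py content out) := by unfold Spec_count_technical_words_py; infer_instance

-- ===== CLAIM (what is proved, stated in full; the proofs are below) =====
def Claim_equal_count_technical_words_py : Prop := ∀ (content : String), Dom_count_technical_words_py content → Spec_count_technical_words_py content (count_technical_words_py content)

-- ===== LEMMAS AND PROOFS =====

set_option maxRecDepth 100000

-- the set literal is already duplicate-free, so A iterates exactly the list pvTermsB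
theorem pvTermsA_eq : pvTermsA = pvTermsB := by rfl

theorem pvTerms_nonempty : ∀ t ∈ pvTermsB, t.toList ≠ [] := by decide

-- every term is filed under its first letter
theorem pvMemByFirst : ∀ t ∈ pvTermsB, t ∈ pvByFirst.getD (t.toList.headD ' ') [] := by decide

-- the first-letter index, evaluated to its literal value
theorem pvByFirst_lit : pvByFirst = PySem.Dict.mk
  [('a', ["algorithm","accuracy","artificial"]), ('m', ["model","machine"]),
   ('t', ["training"]), ('v', ["validation"]), ('p', ["precision"]),
   ('r', ["recall","regression","reinforcement"]), ('o', ["optimization"]),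
   ('h', ["hyperparameter"]), ('n', ["neural"]), ('c', ["classification"]),
   ('s', ["supervised"]), ('u', ["unsupervised"]), ('d', ["deep"])] := by rfl

-- every entry of every bucket is a term whose first letter is the key
theorem pvBucketMem {c : Char} {t : String} (h : t ∈ pvByFirst.getD c []) :
    t ∈ pvTermsB ∧ t.toList.headD ' ' = c := by
  rw [pvByFirst_lit] at h
  by_cases ha : ('a' == c) = true
  · obtain rfl : c = 'a' := (beq_iff_eq.mp ha).symm
    simp [PySem.Dict.getD, PySem.Dict.get?, List.find?] at h
    rcases h with rfl|rfl|rfl <;> exact ⟨by decide, by decide⟩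
  by_cases hm : ('m' == c) = true
  · obtain rfl : c = 'm' := (beq_iff_eq.mp hm).symm
    simp [PySem.Dict.getD, PySem.Dict.get?, List.find?] at h
    rcases h with rfl|rfl <;> exact ⟨by decide, by decide⟩
  by_cases ht : ('t' == c) = true
  · obtain rfl : c = 't' := (beq_iff_eq.mp ht).symm
    simp [PySem.Dict.getD, PySem.Dict.get?, List.find?] at h
    rcases h with rfl <;> exact ⟨by decide, by decide⟩
  by_cases hv : ('v' == c) = true
  · obtain rfl : c = 'v' := (beq_iff_eq.mp hv).symm
    simp [PySem.Dict.getD, PySem.Dict.get?, List.find?] at h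
    rcases h with rfl <;> exact ⟨by decide, by decide⟩
  by_cases hp : ('p' == c) = true
  · obtain rfl : c = 'p' := (beq_iff_eq.mp hp).symm
    simp [PySem.Dict.getD, PySem.Dict.get?, List.find?] at h
    rcases h with rfl <;> exact ⟨by decide, by decide⟩
  by_cases hr : ('r' == c) = true
  · obtain rfl : c = 'r' := (beq_iff_eq.mp hr).symm
    simp [PySem.Dict.getD, PySem.Dict.get?, List.find?] at h
    rcases h with rfl|rfl|rfl <;> exact ⟨by decide, by decide⟩
  by_cases ho : ('o' == c) = true
  · obtain rfl : c = 'o' := (beq_iff_eq.mp ho).symm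
    simp [PySem.Dict.getD, PySem.Dict.get?, List.find?] at h
    rcases h with rfl <;> exact ⟨by decide, by decide⟩
  by_cases hh : ('h' == c) = true
  · obtain rfl : c = 'h' := (beq_iff_eq.mp hh).symm
    simp [PySem.Dict.getD, PySem.Dict.get?, List.find?] at h
    rcases h with rfl <;> exact ⟨by decide, by decide⟩
  by_cases hn : ('n' == c) = true
  · obtain rfl : c = 'n' := (beq_iff_eq.mp hn).symm
    simp [PySem.Dict.getD, PySem.Dict.get?, List.find?] at h
    rcases h with rfl <;> exact ⟨by decide, by decide⟩
  by_cases hc : ('c' == c) = true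
  · obtain rfl : c = 'c' := (beq_iff_eq.mp hc).symm
    simp [PySem.Dict.getD, PySem.Dict.get?, List.find?] at h
    rcases h with rfl <;> exact ⟨by decide, by decide⟩
  by_cases hs : ('s' == c) = true
  · obtain rfl : c = 's' := (beq_iff_eq.mp hs).symm
    simp [PySem.Dict.getD, PySem.Dict.get?, List.find?] at h
    rcases h with rfl <;> exact ⟨by decide, by decide⟩
  by_cases hu : ('u' == c) = true
  · obtain rfl : c = 'u' := (beq_iff_eq.mp hu).symm
    simp [PySem.Dict.getD, PySem.Dict.get?, List.find?] at h
    rcases h with rfl <;> exact ⟨by decide, by decide⟩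
  by_cases hd : ('d' == c) = true
  · obtain rfl : c = 'd' := (beq_iff_eq.mp hd).symm
    simp [PySem.Dict.getD, PySem.Dict.get?, List.find?] at h
    rcases h with rfl <;> exact ⟨by decide, by decide⟩
  exfalso
  simp [PySem.Dict.getD, PySem.Dict.get?, List.find?, ha, hm, ht, hv, hp, hr, ho, hh, hn, hc, hs, hu, hd] at h

-- one position of the scan hits iff some term starts at that position
theorem pvHit_iff (c : Char) (rest : List Char) :
    (((pvByFirst.getD c []).any (fun t => PySem.Chars.startswith (c :: rest) t.toList)) = true)
      ↔ ∃ t ∈ pvTermsB, t.toList <+: (c :: rest) := by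
  rw [List.any_eq_true]
  constructor
  · rintro ⟨t, ht, hs⟩
    exact ⟨t, (pvBucketMem ht).1, (PySem.Chars.startswith_iff _ _).mp hs⟩
  · rintro ⟨t, ht, hp⟩
    refine ⟨t, ?_, (PySem.Chars.startswith_iff _ _).mpr hp⟩
    have hne := pvTerms_nonempty t ht
    obtain ⟨c', l', hl⟩ : ∃ c' l', t.toList = c' :: l' := by
      cases hx : t.toList with
      | nil => exact absurd hx hne
      | cons a b => exact ⟨a, b, rfl⟩
    have hcc : c' = c := by
      rcases hp with ⟨s, hs⟩
      rw [hl] at hs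
      exact (List.cons.injEq _ _ _ _ ▸ hs : _ ∧ _).1 |>.symm ▸ rfl
    have := pvMemByFirst t ht
    rwa [hl, hcc] at this
  
-- the whole scan hits iff some term starts at some position
theorem pvScan_iff (l : List Char) :
    pvScanWord l = true ↔ ∃ t ∈ pvTermsB, ∃ j, t.toList <+: l.drop j := by
  induction l with
  | nil =>
      simp only [pvScanWord, List.drop_nil]
      constructor
      · intro h; cases h
      · rintro ⟨t, ht, _, hp⟩
        have := List.prefix_nil.mp hp
        exact absurd this (pvTerms_nonempty t ht)
  | cons c rest ih =>
      rw [pvScanWord, Bool.or_eq_true, pvHit_iff, ih]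
      constructor
      · rintro (⟨t, ht, hp⟩ | ⟨t, ht, j, hp⟩)
        · exact ⟨t, ht, 0, by simpa using hp⟩
        · exact ⟨t, ht, j + 1, by simpa using hp⟩
      · rintro ⟨t, ht, j, hp⟩
        cases j with
        | zero => exact Or.inl ⟨t, ht, by simpa using hp⟩
        | succ j' => exact Or.inr ⟨t, ht, j', by simpa using hp⟩

-- per word, A's predicate equals B's scan
theorem pvPred_eq (w : String) :
    pvTermsA.any (fun term => PySem.Str.isIn term w) = pvScanWord w.toList := by
  rw [Bool.eq_iff_iff, pvTermsA_eq, List.any_eq_true, pvScan_iff]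
  constructor
  · rintro ⟨t, ht, hin⟩
    have hinf : t.toList <:+: w.toList := (PySem.Str.isIn_iff_infix t w).mp hin
    have : PySem.Chars.isIn t.toList w.toList = true :=
      (PySem.Chars.isIn_iff_infix _ _).mpr hinf
    obtain ⟨j, hj⟩ := (PySem.Chars.exists_prefix_drop_iff_isIn (sub := t.toList) (s := w.toList)).mpr this
    exact ⟨t, ht, j, hj⟩
  · rintro ⟨t, ht, j, hj⟩
    have : PySem.Chars.isIn t.toList w.toList = true :=
      (PySem.Chars.exists_prefix_drop_iff_isIn (sub := t.toList) (s := w.toList)).mp ⟨j, hj⟩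
    exact ⟨t, ht, (PySem.Str.isIn_iff_infix t w).mpr ((PySem.Chars.isIn_iff_infix _ _).mp this)⟩

-- ===== VERDICT (by name: the statement is the Claim_ definition above) =====
theorem count_technical_words_py_spec : Claim_equal_count_technical_words_py := by
  intro content _
  unfold Spec_count_technical_words_py count_technical_words_py count_technical_words_py_alt
  have : (fun (acc : Int) (w : String) =>
            if pvTermsA.any (fun term => PySem.Str.isIn term w) then acc + 1 else acc)
       = (fun (acc : Int) (w : String) => if pvScanWord w.toList then acc + 1 else acc) := by
    funext acc w
    rw [pvPred_eq]
  rw [this]
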